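-- pv_equiv track=rewrite | github.com/PINetDalhousie/Spotlight | scripts/gen_spotlight.py | tcam_range
-- ===== SOURCE A (Python) =====
-- def tcam_range(min_val, max_val):
--     entry_tuples = []
--     if min_val <= max_val:
--         for i in range(64):
--             mask = 1 << i
--             if (min_val & mask) or (mask > max_val):
--                 break
--
--         for j in range(i, -1, -1):
--             stride = (1 << j) - 1
--             if min_val + stride == max_val:
--                 entry_tuples.append((min_val,max_val))
--                 return entry_tuples
--
--             elif min_val + stride < max_val:
--                 entry_tuples.extend(tcam_range(min_val, min_val + stride))
--                 entry_tuples.extend(tcam_range(min_val + stride + 1, max_val))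
--                 return entry_tuples
--     else:
--         return tcam_range(max_val, min_val)
-- ===== SOURCE B (Python) =====
-- def tcam_range(min_val, max_val):
--     if min_val > max_val:
--         min_val, max_val = max_val, min_val
--     out = []
--     cur = min_val
--     while cur <= max_val:
--         i = 63
--         for k in range(64):
--             if (cur & (1 << k)) or (1 << k) > max_val:
--                 i = k
--                 break
--         j = i
--         while j > 0 and cur + (1 << j) - 1 > max_val:
--             j -= 1
--         stride = (1 << j) - 1
--         out.append((cur, cur + stride))
--         cur += stride + 1
--     return out
-- ===== Notes on version B (the rewrite author's own statement) =====
-- stated objective: alternative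
-- what changed: Replaces A's divide-and-conquer double recursion (split the range at an aligned block and recurse on both halves) by a single iterative left-to-right greedy peel that emits each aligned block directly and advances the cursor.
-- outside the precondition, e.g. on tcam_range(-2, 3): A returns [(-2, -2), (-1, -1), (0, 3)], B returns [(-2, -1), (0, 3)]
import Mathlib
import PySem

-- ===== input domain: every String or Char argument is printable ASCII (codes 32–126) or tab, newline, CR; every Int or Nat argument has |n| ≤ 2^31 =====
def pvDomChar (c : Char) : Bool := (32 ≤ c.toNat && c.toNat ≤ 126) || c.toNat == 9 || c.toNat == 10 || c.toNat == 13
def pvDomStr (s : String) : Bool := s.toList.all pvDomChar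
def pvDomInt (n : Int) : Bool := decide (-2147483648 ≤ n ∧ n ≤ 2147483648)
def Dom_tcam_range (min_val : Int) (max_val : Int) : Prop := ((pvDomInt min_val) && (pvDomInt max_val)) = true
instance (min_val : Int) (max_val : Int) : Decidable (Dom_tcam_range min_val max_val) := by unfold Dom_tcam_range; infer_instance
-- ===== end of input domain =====

-- B replaces A's double recursion (split off one aligned block, recurse on both halves)
-- by a single iterative greedy peel left-to-right; objective: alternative (same entries, no recursion).

-- helper cited by the ports' termination proofs
theorem pv_one_le_shl (j : Nat) : (1 : Int) ≤ (1 : Int) <<< j := by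
  rw [Int.shiftLeft_eq]; exact le_mul_of_one_le_right (by norm_num) (one_le_pow₀ (by norm_num))

theorem pv_dec_scan (k : Nat) (h : k < 64) : 64 - (k + 1) < 64 - k := by omega

theorem pv_dec_split1 (mn mx s : Int) (h1 : 1 ≤ s) (hlt : mn + (s - 1) < mx) :
    2 * (mn + (s - 1) - mn).toNat + 3 * (mn - (mn + (s - 1))).toNat
      < 2 * (mx - mn).toNat + 3 * (mn - mx).toNat := by omega

theorem pv_dec_split2 (mn mx s : Int) (h1 : 1 ≤ s) (hlt : mn + (s - 1) < mx) :
    2 * (mx - (mn + (s - 1) + 1)).toNat + 3 * (mn + (s - 1) + 1 - mx).toNat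
      < 2 * (mx - mn).toNat + 3 * (mn - mx).toNat := by omega

theorem pv_dec_swap (mn mx : Int) (h : ¬ mn ≤ mx) :
    2 * (mn - mx).toNat + 3 * (mx - mn).toNat
      < 2 * (mx - mn).toNat + 3 * (mn - mx).toNat := by omega

theorem pv_dec_peel (cur mx s : Int) (h1 : 1 ≤ s) (hle : cur ≤ mx) :
    (mx + 1 - (cur + (s - 1) + 1)).toNat < (mx + 1 - cur).toNat := by omega

-- ===== PORT A =====
-- A's first loop: for i in range(64): if (min_val & (1<<i)) or ((1<<i) > max_val): break
-- (value of i after the loop: first k < 64 with the condition, else the leftover 63)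
def tcamScanA (min_val : Int) (max_val : Int) (k : Nat) : Nat :=
  if k < 64 then
    (if PySem.Int.band min_val ((1 : Int) <<< k) ≠ 0 ∨ (1 : Int) <<< k > max_val then k
     else tcamScanA min_val max_val (k + 1))
  else 63
termination_by 64 - k
decreasing_by
  exact pv_dec_scan k (by assumption)

-- A's second loop: for j in range(i, -1, -1): …  — the loop body only acts (returns) at the
-- first j with min_val + (1<<j) - 1 ≤ max_val; this helper finds that j (none = loop fell through).
def tcamFindJA (min_val : Int) (max_val : Int) : Nat → Option Nat
  | 0 => if min_val + (1 : Int) <<< (0 : Nat) - 1 ≤ max_val then some 0 else none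
  | (j + 1) =>
      if min_val + (1 : Int) <<< (j + 1) - 1 ≤ max_val then some (j + 1)
      else tcamFindJA min_val max_val j

def tcam_range (min_val : Int) (max_val : Int) : List (Int × Int) :=
  if hle : min_val ≤ max_val then
    let i := tcamScanA min_val max_val 0
    match tcamFindJA min_val max_val i with
    | none => []   -- loop fell through: Python would return None; unreachable since min_val ≤ max_val
    | some j =>
      let stride : Int := (1 : Int) <<< j - 1
      if heq : min_val + stride = max_val then [(min_val, max_val)]
      else if hlt : min_val + stride < max_val then
        tcam_range min_val (min_val + stride) ++ tcam_range (min_val + stride + 1) max_val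
      else []   -- unreachable: tcamFindJA guarantees min_val + stride ≤ max_val
  else tcam_range max_val min_val
termination_by 2 * (max_val - min_val).toNat + 3 * (min_val - max_val).toNat
decreasing_by
  · exact pv_dec_split1 min_val max_val ((1 : Int) <<< j) (pv_one_le_shl j) hlt
  · exact pv_dec_split2 min_val max_val ((1 : Int) <<< j) (pv_one_le_shl j) hlt
  · exact pv_dec_swap min_val max_val hle

-- ===== PORT B =====
-- B's inner bit scan (same scan as the Python B writes: i defaults to 63, break sets it)
def tcamLowBitB (cur : Int) (max_val : Int) (k : Nat) : Nat :=
  if h : k < 64 then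
    (if PySem.Int.band cur ((1 : Int) <<< k) ≠ 0 ∨ (1 : Int) <<< k > max_val then k
     else tcamLowBitB cur max_val (k + 1))
  else 63
termination_by 64 - k
decreasing_by
  exact pv_dec_scan k (by assumption)

-- B's stride shrink: while j > 0 and cur + (1<<j) - 1 > max_val: j -= 1
def tcamShrinkB (cur : Int) (max_val : Int) : Nat → Nat
  | 0 => 0
  | (j + 1) =>
      if cur + (1 : Int) <<< (j + 1) - 1 > max_val then tcamShrinkB cur max_val j
      else j + 1

-- B's main loop: while cur <= max_val: … append (cur, cur+stride); cur += stride + 1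
def tcamPeelB (cur : Int) (max_val : Int) : List (Int × Int) :=
  if hle : cur ≤ max_val then
    let i := tcamLowBitB cur max_val 0
    let j := tcamShrinkB cur max_val i
    let stride : Int := (1 : Int) <<< j - 1
    (cur, cur + stride) :: tcamPeelB (cur + stride + 1) max_val
  else []
termination_by (max_val + 1 - cur).toNat
decreasing_by
  exact pv_dec_peel cur max_val ((1 : Int) <<< tcamShrinkB cur max_val (tcamLowBitB cur max_val 0))
    (pv_one_le_shl _) hle

def tcam_range_alt (min_val : Int) (max_val : Int) : List (Int × Int) :=
  if min_val > max_val then tcamPeelB max_val min_val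
  else tcamPeelB min_val max_val

-- ===== PRECONDITION & SPEC =====
-- Pre_ restricts to the function's natural domain, nonnegative endpoints: TCAM prefix entries are
-- only meaningful for nonnegative values, and on negative endpoints A's two's-complement bit scan
-- degenerates to emitting one singleton entry per negative integer (time and output linear in the
-- range size, unusable at the domain's scale) — an artefact B does not fully reproduce.
def Pre_tcam_range (min_val : Int) (max_val : Int) : Prop := 0 ≤ min_val ∧ 0 ≤ max_val
instance (min_val : Int) (max_val : Int) : Decidable (Pre_tcam_range min_val max_val) := by
  unfold Pre_tcam_range; infer_instance
def pvWitness_tcam_range : Int × Int := (3, 10)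

def Spec_tcam_range (min_val : Int) (max_val : Int) (out : List (Int × Int)) : Prop := out = tcam_range_alt min_val max_val
instance (min_val : Int) (max_val : Int) (out : List (Int × Int)) : Decidable (Spec_tcam_range min_val max_val out) := by unfold Spec_tcam_range; infer_instance

-- ===== CLAIM (what is proved, stated in full; the proofs are below) =====
def Claim_equal_tcam_range : Prop := ∀ (min_val : Int) (max_val : Int), Dom_tcam_range min_val max_val → Pre_tcam_range min_val max_val → Spec_tcam_range min_val max_val (tcam_range min_val max_val)

-- ===== LEMMAS AND PROOFS =====

theorem one_shl_eq_pow (j : Nat) : (1 : Int) <<< j = 2 ^ j := by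
  rw [Int.shiftLeft_eq]; ring

theorem scan_eq_lowBit (min_val max_val : Int) (k : Nat) :
    tcamScanA min_val max_val k = tcamLowBitB min_val max_val k := by
  fun_induction tcamScanA min_val max_val k with
  | case1 k h hc => rw [tcamLowBitB]; simp [h, hc]
  | case2 k h hc ih => rw [tcamLowBitB]; simp [h, hc]; exact ih
  | case3 k h => rw [tcamLowBitB]; simp [h]

theorem scanA_le (min_val max_val : Int) (k : Nat) : tcamScanA min_val max_val k ≤ 63 := by
  fun_induction tcamScanA min_val max_val k with
  | case1 k h hc => omega
  | case2 k h hc ih => exact ih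
  | case3 k h => omega

theorem scanA_bits (min_val max_val : Int) (k t : Nat) (hk : k ≤ t)
    (ht : t < tcamScanA min_val max_val k) :
    PySem.Int.band min_val ((1 : Int) <<< t) = 0 ∧ (1 : Int) <<< t ≤ max_val := by
  fun_induction tcamScanA min_val max_val k with
  | case1 k h hc => omega
  | case2 k h hc ih =>
      rcases Nat.eq_or_lt_of_le hk with rfl | hlt
      · rcases not_or.mp hc with ⟨h1, h2⟩
        exact ⟨not_not.mp h1, not_lt.mp h2⟩
      · exact ih hlt ht
  | case3 k h => omega

theorem scanA_lower (min_val max_val : Int) (k : Nat) :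
    min k 63 ≤ tcamScanA min_val max_val k := by
  fun_induction tcamScanA min_val max_val k with
  | case1 k h hc => omega
  | case2 k h hc ih => omega
  | case3 k h => omega

theorem scanA_ge (min_val max_val : Int) (j : Nat) (hj : j ≤ 63)
    (hpass : ∀ t, t < j → PySem.Int.band min_val ((1 : Int) <<< t) = 0 ∧ (1 : Int) <<< t ≤ max_val)
    (k : Nat) (hk : k ≤ j) : j ≤ tcamScanA min_val max_val k := by
  fun_induction tcamScanA min_val max_val k with
  | case1 k h hc =>
      by_cases hkj : k < j
      · rcases hpass k hkj with ⟨h1, h2⟩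
        rcases hc with hc | hc
        · exact absurd h1 hc
        · exact absurd h2 (not_le.mpr hc)
      · omega
  | case2 k h hc ih =>
      by_cases hkj : k < j
      · exact ih hkj
      · have : k = j := by omega
        subst this
        have := scanA_lower min_val max_val (k + 1)
        omega
  | case3 k h => omega

theorem shrink_le_max (min_val max_val : Int) (hle : min_val ≤ max_val) (i : Nat) :
    min_val + (1 : Int) <<< (tcamShrinkB min_val max_val i) - 1 ≤ max_val := by
  induction i with
  | zero => simp [tcamShrinkB, one_shl_eq_pow]; omega
  | succ j ih =>
      unfold tcamShrinkB
      split
      · exact ih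
      · omega

theorem findJ_eq_shrink (min_val max_val : Int) (hle : min_val ≤ max_val) (i : Nat) :
    tcamFindJA min_val max_val i = some (tcamShrinkB min_val max_val i) := by
  induction i with
  | zero =>
      have h0 : min_val + (1 : Int) <<< (0 : Nat) - 1 ≤ max_val := by
        rw [one_shl_eq_pow]; omega
      simp [tcamFindJA, tcamShrinkB, h0, hle]
  | succ j ih =>
      by_cases h : min_val + (1 : Int) <<< (j + 1) - 1 ≤ max_val
      · simp [tcamFindJA, tcamShrinkB, h, not_lt.mpr h]
      · simp only [tcamFindJA, tcamShrinkB, if_neg h, if_pos (lt_of_not_ge h)]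
        exact ih

theorem shrink_le (cur max_val : Int) (i : Nat) : tcamShrinkB cur max_val i ≤ i := by
  induction i with
  | zero => simp [tcamShrinkB]
  | succ j ih => unfold tcamShrinkB; split <;> omega

theorem findJ_at (min_val max_val : Int) (j : Nat)
    (heq : min_val + (1 : Int) <<< j - 1 ≤ max_val)
    (hgt : ∀ u, j < u → ¬ (min_val + (1 : Int) <<< u - 1 ≤ max_val)) :
    ∀ t, j ≤ t → tcamFindJA min_val max_val t = some j := by
  intro t ht
  induction t with
  | zero =>
      have : j = 0 := by omega
      subst this
      rw [tcamFindJA, if_pos heq]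
  | succ u ih =>
      rcases Nat.eq_or_lt_of_le ht with rfl | hlt
      · rw [tcamFindJA, if_pos heq]
      · rw [tcamFindJA, if_neg (hgt (u+1) hlt)]
        exact ih (by omega)

theorem pow_lt_pow_int (j u : Nat) (h : j < u) : (2:Int) ^ j < 2 ^ u :=
  pow_lt_pow_right₀ (by norm_num) h

theorem tcamA_singleton (min_val : Int) (j : Nat) (hj : j ≤ 63) (hmin : 0 ≤ min_val)
    (hbits : ∀ t, t < j → PySem.Int.band min_val ((1 : Int) <<< t) = 0) :
    tcam_range min_val (min_val + ((1 : Int) <<< j - 1)) = [(min_val, min_val + ((1 : Int) <<< j - 1))] := by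
  have hshl : ∀ u : Nat, (1 : Int) <<< u = 2 ^ u := one_shl_eq_pow
  have h1 : (1:Int) ≤ (1:Int) <<< j := by rw [hshl]; exact one_le_pow₀ (by norm_num)
  set m' : Int := min_val + ((1 : Int) <<< j - 1) with hm'
  have hle : min_val ≤ m' := by omega
  have hpass : ∀ t, t < j → PySem.Int.band min_val ((1 : Int) <<< t) = 0 ∧ (1 : Int) <<< t ≤ m' := by
    intro t htj
    refine ⟨hbits t htj, ?_⟩
    have := pow_lt_pow_int t j htj
    rw [hshl] at *
    omega
  have hge : j ≤ tcamScanA min_val m' 0 := scanA_ge min_val m' j hj hpass 0 (by omega)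
  have hfind : tcamFindJA min_val m' (tcamScanA min_val m' 0) = some j := by
    apply findJ_at
    · omega
    · intro u hu
      have := pow_lt_pow_int j u hu
      simp only [hm', hshl]
      omega
    · exact hge
  rw [tcam_range, dif_pos hle]
  simp only [hfind]
  rw [dif_pos (show min_val + ((1 : Int) <<< j - 1) = m' from rfl)]

theorem tcam_main (n : Nat) : ∀ (min_val max_val : Int), 0 ≤ min_val → min_val ≤ max_val →
    (max_val - min_val).toNat ≤ n → tcam_range min_val max_val = tcamPeelB min_val max_val := by
  induction n using Nat.strong_induction_on with
  | _ n ih =>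
    intro min_val max_val hmin hle hn
    have hshl : ∀ u : Nat, (1 : Int) <<< u = 2 ^ u := one_shl_eq_pow
    set i := tcamScanA min_val max_val 0 with hi
    set j := tcamShrinkB min_val max_val i with hjdef
    have hfind : tcamFindJA min_val max_val i = some j := findJ_eq_shrink min_val max_val hle i
    have hstr : min_val + (1 : Int) <<< j - 1 ≤ max_val := shrink_le_max min_val max_val hle i
    have h1 : (1:Int) ≤ (1:Int) <<< j := by rw [hshl]; exact one_le_pow₀ (by norm_num)
    have hpeel : tcamPeelB min_val max_val =
        (min_val, min_val + ((1 : Int) <<< j - 1)) :: tcamPeelB (min_val + ((1 : Int) <<< j - 1) + 1) max_val := by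
      rw [tcamPeelB, dif_pos hle]
      simp only [← scan_eq_lowBit, ← hi, ← hjdef]
    rw [tcam_range, dif_pos hle]
    simp only [← hi, hfind]
    by_cases heq : min_val + ((1 : Int) <<< j - 1) = max_val
    · rw [dif_pos heq, hpeel, heq]
      have : ¬ (max_val + 1 ≤ max_val) := by omega
      rw [tcamPeelB, dif_neg this]
    · have hlt : min_val + ((1 : Int) <<< j - 1) < max_val := by omega
      rw [dif_neg heq, dif_pos hlt, hpeel]
      have hsing : tcam_range min_val (min_val + ((1 : Int) <<< j - 1)) =
          [(min_val, min_val + ((1 : Int) <<< j - 1))] := by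
        apply tcamA_singleton min_val j
        · have := scanA_le min_val max_val 0
          have := shrink_le min_val max_val i
          omega
        · exact hmin
        · intro t htj
          have hti : t < i := by
            have := shrink_le min_val max_val i
            omega
          exact (scanA_bits min_val max_val 0 t (by omega) hti).1
      rw [hsing]
      have hrest : tcam_range (min_val + ((1 : Int) <<< j - 1) + 1) max_val =
          tcamPeelB (min_val + ((1 : Int) <<< j - 1) + 1) max_val := by
        apply ih (max_val - (min_val + ((1 : Int) <<< j - 1) + 1)).toNat
        · omega
        · omega
        · omega
        · omega
      rw [hrest]
      simp

-- ===== VERDICT (by name: the statement is the Claim_ definition above) =====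
theorem tcam_range_spec : Claim_equal_tcam_range := by
  intro min_val max_val _ hpre
  unfold Spec_tcam_range tcam_range_alt
  rcases hpre with ⟨h1, h2⟩
  by_cases hle : min_val ≤ max_val
  · rw [if_neg (not_lt.mpr hle)]
    exact tcam_main (max_val - min_val).toNat min_val max_val h1 hle le_rfl
  · have hlt : max_val < min_val := lt_of_not_ge hle
    rw [if_pos hlt]
    rw [tcam_range]; rw [dif_neg hle]
    exact tcam_main (min_val - max_val).toNat max_val min_val h2 (le_of_lt hlt) le_rfl
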